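-- pv_equiv track=rewrite | github.com/emfcamp/software_stories | majority_judgement.py | group_by_median
-- ===== SOURCE A (Python) =====
-- from collections import OrderedDict
--
-- def get_floor_median(values):
--     """
--     Return the middle element (rounding down) from a sorted list of values
--     """
--     if len(values) == 1:
--         return values[0]
--     elif len(values) == 0:
--         raise Exception('Cannot find median of empty list')
--     median_index = int((len(values) - 0.5) // 2)
--     return values[median_index]
--
-- def group_by_median(submission_scores):
--     """
--     Group scored submissions by their median score.
--
--     Returns an OrderedDict by score.
--     """
--     res = {}
--     for score_set in submission_scores:
--         key = get_floor_median(score_set)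
--
--         if key not in res:
--             res[key] = []
--         res[key].append(score_set)
--
--     return OrderedDict(sorted(res.items(), key=lambda x: x[0]))
-- ===== SOURCE B (Python) =====
-- from collections import OrderedDict
--
--
-- def get_floor_median(values):
--     """
--     Return the middle element (rounding down) from a sorted list of values
--     """
--     if len(values) == 1:
--         return values[0]
--     elif len(values) == 0:
--         raise Exception('Cannot find median of empty list')
--     median_index = int((len(values) - 0.5) // 2)
--     return values[median_index]
--
--
-- def group_by_median(submission_scores):
--     """
--     Group scored submissions by their median score.
--
--     Returns an OrderedDict by score.
--     """
--     groups = []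
--     for score_set in sorted(submission_scores, key=get_floor_median):
--         key = get_floor_median(score_set)
--         if groups and groups[-1][0] == key:
--             groups[-1][1].append(score_set)
--         else:
--             groups.append((key, [score_set]))
--     return OrderedDict(groups)
-- ===== Notes on version B (the rewrite author's own statement) =====
-- stated objective: alternative
-- what changed: Replaces the dict-bucketing pass followed by sorting the key/items pairs with a stable sort of the submissions by their floor-median and a single adjacent-grouping pass over the sorted list.
import Mathlib
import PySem

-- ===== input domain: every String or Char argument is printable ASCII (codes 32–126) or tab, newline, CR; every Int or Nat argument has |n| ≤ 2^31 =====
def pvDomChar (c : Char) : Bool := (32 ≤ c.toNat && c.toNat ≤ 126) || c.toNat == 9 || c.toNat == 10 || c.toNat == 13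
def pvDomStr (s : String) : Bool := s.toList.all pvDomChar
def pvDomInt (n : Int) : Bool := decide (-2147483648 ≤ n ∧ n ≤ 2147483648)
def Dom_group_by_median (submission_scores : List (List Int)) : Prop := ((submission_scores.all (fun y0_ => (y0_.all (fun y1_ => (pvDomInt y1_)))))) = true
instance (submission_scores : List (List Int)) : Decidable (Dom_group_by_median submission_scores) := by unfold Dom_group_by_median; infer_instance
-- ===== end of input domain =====

-- B replaces A's dict-bucketing pass followed by sorting the items with a stable sort of the
-- submissions by floor-median and one adjacent-grouping pass (objective: alternative).


-- ===== PORT A =====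
-- helper of the module, used unchanged by both versions; none = the Exception on the empty list
def get_floor_median (values : List Int) : Option Int :=
  if PySem.List.len values = 1 then PySem.List.pyGet? values 0
  else if PySem.List.len values = 0 then none
  else
    -- median_index = int((len(values) - 0.5) // 2) = (2*len - 1) // 4 exactly
    -- (the float arithmetic is exact for len ≤ 2^31 < 2^52)
    PySem.List.pyGet? values (PySem.Int.floordiv (2 * PySem.List.len values - 1) 4)

def group_by_median (submission_scores : List (List Int)) : List (Int × List (List Int)) :=
  let res : PySem.Dict Int (List (List Int)) :=
    submission_scores.foldl (fun res score_set =>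
      -- Python raises here on an empty score_set; the .getD 0 default is unreachable under Pre_
      let key := (get_floor_median score_set).getD 0
      let res := if res.contains key then res else res.insert key []   -- if key not in res: res[key] = []
      res.modify key [] (fun g => g ++ [score_set]))                   -- res[key].append(score_set)
      PySem.Dict.empty
  PySem.List.sorted res.items (fun x => x.1) false

-- ===== PORT B =====
def group_by_median_alt (submission_scores : List (List Int)) : List (Int × List (List Int)) :=
  -- groups is built back-to-front (head = Python's groups[-1]) and reversed at the end
  let rgroups :=
    (PySem.List.sorted submission_scores (fun s => (get_floor_median s).getD 0) false).foldl
      (fun rgroups score_set =>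
        let key := (get_floor_median score_set).getD 0   -- unreachable default, as in port A
        match rgroups with
        | (k, g) :: rest =>
            if k = key then (k, g ++ [score_set]) :: rest
            else (key, [score_set]) :: (k, g) :: rest
        | [] => [(key, [score_set])]) []
  rgroups.reverse

-- ===== PRECONDITION & SPEC =====
-- Pre_ excludes inputs containing an empty score list: there get_floor_median raises
-- 'Cannot find median of empty list' in A (and in B, inside sorted's key call).
def Pre_group_by_median (submission_scores : List (List Int)) : Prop :=
  ∀ s ∈ submission_scores, s ≠ []
instance (submission_scores : List (List Int)) : Decidable (Pre_group_by_median submission_scores) := by unfold Pre_group_by_median; infer_instance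
def pvWitness_group_by_median : List (List Int) := [[1, 2, 3], [5], [1, 9], [2, 2, 2]]

def Spec_group_by_median (submission_scores : List (List Int)) (out : List (Int × List (List Int))) : Prop := out = group_by_median_alt submission_scores
instance (submission_scores : List (List Int)) (out : List (Int × List (List Int))) : Decidable (Spec_group_by_median submission_scores out) := by unfold Spec_group_by_median; infer_instance

-- ===== CLAIM (what is proved, stated in full; the proofs are below) =====
def Claim_equal_group_by_median : Prop := ∀ (submission_scores : List (List Int)), Dom_group_by_median submission_scores → Pre_group_by_median submission_scores → Spec_group_by_median submission_scores (group_by_median submission_scores)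

-- ===== LEMMAS AND PROOFS =====

-- the (total) key both ports group by
def pvMed (s : List Int) : Int := (get_floor_median s).getD 0

-- ---- stability of PySem.List.sorted: filtering one key class commutes with sorting ----
theorem pv_filter_insertBy {α : Type} (key : α → Int) (k : Int) (x : α) (ys : List α)
    (hs : ys.Pairwise (fun a b => key a ≤ key b)) :
    (PySem.List.insertBy (fun a b => decide (key a < key b)) x ys).filter (fun s => key s == k)
      = ys.filter (fun s => key s == k) ++ (if key x == k then [x] else []) := by
  induction ys with
  | nil => by_cases hxk : key x == k <;> simp_all [PySem.List.insertBy]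
  | cons y ys ih =>
    rw [List.pairwise_cons] at hs
    by_cases h : key x < key y
    · simp only [PySem.List.insertBy, h, decide_true, if_true]
      by_cases hxk : key x == k
      · have hk : key x = k := by simpa using hxk
        have hnone : ∀ s ∈ y :: ys, ¬ ((key s == k) = true) := by
          intro s hsmem
          rcases List.mem_cons.mp hsmem with rfl | hmem
          · simp [← hk]; omega
          · have := hs.1 _ hmem; simp [← hk]; omega
        rw [List.filter_cons_of_pos (by simpa using hxk),
            List.filter_eq_nil_iff.mpr hnone]
        simp [hxk]
      · have hx' : ¬ ((key x == k) = true) := hxk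
        simp only [List.filter_cons, hx']
        simp
    · simp only [PySem.List.insertBy, h, decide_false, Bool.false_eq_true, if_false]
      rw [List.filter_cons, List.filter_cons, ih hs.2]
      by_cases hy : key y == k <;> simp [hy]

theorem pv_sorted_filter {α : Type} (key : α → Int) (k : Int) (l : List α) :
    (PySem.List.sorted l key).filter (fun s => key s == k) = l.filter (fun s => key s == k) := by
  induction l using List.reverseRecOn with
  | nil => simp [PySem.List.sorted]
  | append_singleton t x ih =>
    rw [PySem.List.sorted_eq_foldl_insertBy, List.foldl_append, List.foldl_cons, List.foldl_nil,
        ← PySem.List.sorted_eq_foldl_insertBy,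
        pv_filter_insertBy key k x _ (PySem.List.sorted_pairwise t key), ih, List.filter_append]
    by_cases hx : key x == k <;> simp [hx]

theorem pv_ofList_sublist {α : Type} [BEq α] [LawfulBEq α] (xs : List α) :
    (PySem.Set.ofList xs).Sublist xs := by
  induction xs with
  | nil => simp [PySem.Set.ofList, PySem.Set.empty]
  | cons x xs ih =>
    rw [PySem.Set.ofList_cons]
    exact List.Sublist.cons₂ x (List.Sublist.trans (List.filter_sublist) ih)

theorem pv_pairwise_lt_ofList (xs : List Int) (hs : xs.Pairwise (· ≤ ·)) :
    (PySem.Set.ofList xs).Pairwise (· < ·) := by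
  have hle := (hs.sublist (pv_ofList_sublist xs))
  have hnd : (PySem.Set.ofList xs).Pairwise (· ≠ ·) := PySem.Set.nodup_ofList xs
  exact (hle.and hnd).imp (fun h => lt_of_le_of_ne h.1 h.2)

theorem pv_dict_step (d : PySem.Dict Int (List (List Int))) (k : Int) (s : List Int) :
    (if d.contains k then d else d.insert k ([] : List (List Int))).modify k [] (fun g => g ++ [s])
      = d.modify k [] (fun g => g ++ [s]) := by
  by_cases h : d.contains k
  · simp [h]
  · simp only [h, Bool.false_eq_true, if_false]
    simp only [PySem.Dict.modify, PySem.Dict.getD_insert_self,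
      PySem.Dict.getD_of_not_contains d _ (by simpa using h)]
    -- (d.insert k []).insert k [s] = d.insert k [s] when k is fresh
    have hmem : ∀ p ∈ d.items, p.1 ≠ k := by
      intro p hp he
      obtain ⟨p1, p2⟩ := p
      exact (by simpa [PySem.Dict.contains] using h : ∀ x, (k, x) ∉ d.items) p2 (by simpa [show p1 = k from he] using hp)
    apply PySem.Dict.ext
    simp only [PySem.Dict.insert, h, Bool.false_eq_true, if_false]
    have hc2 : (PySem.Dict.mk (d.items ++ [(k, ([] : List (List Int)))])).contains k = true := by
      simp [PySem.Dict.contains]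
    simp only [hc2, if_true]
    rw [List.map_append, List.map_congr_left (g := id) (fun p hp => by simp [hmem p hp])]
    simp

theorem pv_fold_getD (l : List (List Int)) (d : PySem.Dict Int (List (List Int))) (k : Int) :
    (l.foldl (fun d s => d.modify (pvMed s) [] (fun g => g ++ [s])) d).getD k []
      = d.getD k [] ++ l.filter (fun s => pvMed s == k) := by
  induction l generalizing d with
  | nil => simp
  | cons s l ih =>
    rw [List.foldl_cons, ih, PySem.Dict.getD_modify, List.filter_cons]
    by_cases h : pvMed s = k
    · simp [h]
    · simp [h, Ne.symm h]

theorem pv_portA (l : List (List Int)) :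
    group_by_median l
      = PySem.List.sorted
          ((PySem.Set.ofList (l.map pvMed)).map (fun k => (k, l.filter (fun s => pvMed s == k))))
          (fun x => x.1) false := by
  unfold group_by_median
  have hstep : (fun (res : PySem.Dict Int (List (List Int))) score_set =>
      let key := (get_floor_median score_set).getD 0
      let res := if res.contains key then res else res.insert key []
      res.modify key [] (fun g => g ++ [score_set]))
      = (fun d s => d.modify (pvMed s) [] (fun g => g ++ [s])) := by
    funext d s
    exact pv_dict_step d (pvMed s) s
  rw [hstep]
  show PySem.List.sorted (List.foldl (fun d s => d.modify (pvMed s) [] fun g => g ++ [s]) PySem.Dict.empty l).items (fun x => x.1) false = _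
  congr 1
  have hnd : (l.foldl (fun d s => d.modify (pvMed s) [] (fun g => g ++ [s])) PySem.Dict.empty).keys.Nodup := by
    exact PySem.Dict.nodup_keys_foldl_modify_key l pvMed [] (fun _ s => fun g => g ++ [s]) PySem.Dict.empty (by simp)
  have hkeys : (l.foldl (fun d s => d.modify (pvMed s) [] (fun g => g ++ [s])) PySem.Dict.empty).keys
      = PySem.Set.ofList (l.map pvMed) := by
    rw [PySem.Dict.keys_foldl_modify_key l pvMed [] (fun _ s => fun g => g ++ [s]) PySem.Dict.empty]
    simp [PySem.Set.update_nil_left]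
  rw [PySem.Dict.items_eq_map_keys _ hnd [], hkeys]
  exact List.map_congr_left (fun k hk => by rw [pv_fold_getD]; simp)

theorem pv_group_fold (t : List (List Int)) (hs : (t.map pvMed).Pairwise (· ≤ ·)) :
    (t.foldl (fun rgroups score_set =>
        let key := (get_floor_median score_set).getD 0
        match rgroups with
        | (k, g) :: rest =>
            if k = key then (k, g ++ [score_set]) :: rest
            else (key, [score_set]) :: (k, g) :: rest
        | [] => [(key, [score_set])]) [])
      = ((PySem.Set.ofList (t.map pvMed)).map
          (fun k => (k, t.filter (fun s => pvMed s == k)))).reverse := by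
  induction t using List.reverseRecOn with
  | nil => simp
  | append_singleton t x ih =>
    rw [List.map_append] at hs
    have hs1 : (t.map pvMed).Pairwise (· ≤ ·) := hs.sublist (List.sublist_append_left _ _)
    have hx : ∀ a ∈ t.map pvMed, a ≤ pvMed x := by
      intro a ha
      have := (List.pairwise_append.mp hs).2.2
      simpa using this a ha (pvMed x) (by simp)
    rw [List.foldl_append, List.foldl_cons, List.foldl_nil, ih hs1]
    have hmap : (t ++ [x]).map pvMed = t.map pvMed ++ [pvMed x] := by simp
    rcases eq_or_ne t [] with rfl | hne
    · simp [PySem.Set.ofList_cons, PySem.Set.discard, pvMed]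
    have hSne : PySem.Set.ofList (t.map pvMed) ≠ [] := by
      have : pvMed (t.head hne) ∈ PySem.Set.ofList (t.map pvMed) := by
        rw [PySem.Set.mem_ofList]
        exact List.mem_map_of_mem (List.head_mem hne)
      intro h0; rw [h0] at this; exact (List.not_mem_nil) this
    have hSsub : ∀ a ∈ PySem.Set.ofList (t.map pvMed), a ∈ t.map pvMed :=
      fun a ha => (PySem.Set.mem_ofList _ _).mp ha
    have hSlt : (PySem.Set.ofList (t.map pvMed)).Pairwise (· < ·) := pv_pairwise_lt_ofList _ hs1
    rcases (List.eq_nil_or_concat (PySem.Set.ofList (t.map pvMed))).resolve_left hSne with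
      ⟨S₀, kl, hd⟩
    rw [List.concat_eq_append] at hd
    rw [hd] at hSsub hSlt
    have hlt_last : ∀ a ∈ S₀, a < kl := by
      have h2 := List.pairwise_append.mp hSlt
      intro a ha; simpa using h2.2.2 a ha kl (by simp)
    have hklmem : kl ∈ t.map pvMed := hSsub kl (by simp)
    by_cases hmem : pvMed x ∈ t.map pvMed
    · -- the new key equals the last key kl, so it lands in the last group
      have hkeq : pvMed x = kl := by
        have hkS : pvMed x ∈ S₀ ++ [kl] := by
          rw [← hd, PySem.Set.mem_ofList]; exact hmem
        rcases List.mem_append.mp hkS with h | h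
        · have h1 := hlt_last _ h
          have h2 : kl ≤ pvMed x := hx kl hklmem
          omega
        · simpa using h
      have hSnew : PySem.Set.ofList ((t ++ [x]).map pvMed) = S₀ ++ [kl] := by
        rw [hmap, PySem.Set.ofList_append_singleton, hd,
          PySem.Set.add_of_mem (by rw [hkeq]; simp)]
      rw [hSnew, hd]
      rw [List.map_append, List.map_append, List.map_singleton, List.map_singleton,
        List.reverse_append, List.reverse_append]
      simp only [List.reverse_singleton, List.singleton_append]
      have hfilters : ∀ a ∈ S₀,
          (fun k' => (k', (t ++ [x]).filter (fun s => pvMed s == k'))) a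
            = (fun k' => (k', t.filter (fun s => pvMed s == k'))) a := by
        intro a ha
        have hane : pvMed x ≠ a := by have := hlt_last a ha; omega
        simp [List.filter_append, hane]
      rw [List.map_congr_left hfilters]
      simp only [List.filter_append, List.filter_cons, List.filter_nil]
      rw [show (get_floor_median x).getD 0 = kl from hkeq]
      simp [hkeq]
    · -- a brand new key: a fresh group is opened
      have hSnew : PySem.Set.ofList ((t ++ [x]).map pvMed) = (S₀ ++ [kl]) ++ [pvMed x] := by
        rw [hmap, PySem.Set.ofList_append_singleton, hd,
          PySem.Set.add_of_not_mem (by intro h; exact hmem (hSsub _ h))]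
      rw [hSnew, hd]
      have hlne : kl ≠ pvMed x := by
        intro h; exact hmem (h ▸ hklmem)
      have hfilters : ∀ a ∈ S₀ ++ [kl],
          (fun k' => (k', (t ++ [x]).filter (fun s => pvMed s == k'))) a
            = (fun k' => (k', t.filter (fun s => pvMed s == k'))) a := by
        intro a ha
        have hane : pvMed x ≠ a := fun h => hmem (h ▸ hSsub a ha)
        simp [List.filter_append, hane]
      have htfk : t.filter (fun s => pvMed s == pvMed x) = [] := by
        rw [List.filter_eq_nil_iff]
        intro s hsmem
        simp only [beq_iff_eq]
        exact fun h => hmem (h ▸ List.mem_map_of_mem hsmem)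
      rw [List.map_append (l₁ := S₀ ++ [kl]), List.reverse_append,
        List.map_congr_left hfilters, List.map_singleton, List.reverse_singleton,
        List.singleton_append]
      rw [List.map_append, List.map_singleton, List.reverse_append, List.reverse_singleton,
        List.singleton_append]
      simp only [pvMed] at hlne
      simp [hlne, List.filter_append]
      exact ⟨rfl, fun a ha h => hmem (h ▸ List.mem_map_of_mem ha)⟩

theorem pv_portB (l : List (List Int)) :
    group_by_median_alt l
      = (PySem.Set.ofList ((PySem.List.sorted l pvMed).map pvMed)).map
          (fun k => (k, l.filter (fun s => pvMed s == k))) := by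
  have h := pv_group_fold (PySem.List.sorted l pvMed) (PySem.List.sorted_map_key_pairwise l pvMed)
  exact (congrArg List.reverse h).trans
    (by rw [List.reverse_reverse]
        exact List.map_congr_left (fun k _ => by rw [pv_sorted_filter]))

-- ===== VERDICT (by name: the statement is the Claim_ definition above) =====
theorem group_by_median_spec : Claim_equal_group_by_median := by
  intro l _ _
  unfold Spec_group_by_median
  rw [pv_portA, pv_portB]
  apply PySem.List.sorted_eq_of_perm_of_pairwise_lt
  · apply List.Perm.map
    rw [List.perm_ext_iff_of_nodup (PySem.Set.nodup_ofList _) (PySem.Set.nodup_ofList _)]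
    intro a
    rw [PySem.Set.mem_ofList, PySem.Set.mem_ofList]
    constructor
    · intro h
      rcases List.mem_map.mp h with ⟨s, hsmem, rfl⟩
      exact List.mem_map_of_mem ((PySem.List.sorted_perm l pvMed false).mem_iff.mp hsmem)
    · intro h
      rcases List.mem_map.mp h with ⟨s, hsmem, rfl⟩
      exact List.mem_map_of_mem ((PySem.List.sorted_perm l pvMed false).mem_iff.mpr hsmem)
  · rw [List.pairwise_map]
    exact pv_pairwise_lt_ofList _ (PySem.List.sorted_map_key_pairwise l pvMed)
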